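-- pv_equiv track=rewrite | github.com/MATIKO100YT/organic-compounds-name-generator | GUI/organicNameGeneratorGUI.py | generateSubstituentString
-- ===== SOURCE A (Python) =====
-- def generateSubstituentString(substituents):
--     substituentCounts = {}
--     for position, type_ in substituents:
--         if type_ not in substituentCounts:
--             substituentCounts[type_] = []
--         substituentCounts[type_].append(position)
--
--     substituentOrder = {
--         "CH3": "metylo",
--         "C2H5": "etylo",
--         "Cl": "chloro",
--         "Br": "bromo",
--         "F": "fluoro",
--         "NO2": "nitro",
--     }
--
--     substituentStrings = []
--     for type_, positions in sorted(substituentCounts.items(), key=lambda x: substituentOrder.get(x[0], x[0])):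
--         count = len(positions)
--         positionsStr = ",".join(map(str, sorted(positions)))
--         prefix = substituentOrder.get(type_, type_)
--         multiplicativePrefix = {
--             1: "", 2: "di", 3: "tri", 4: "tetra", 5: "penta", 6: "heksa", 7: "hepta", 8: "okta", 9: "nona", 10: "deka"
--         }.get(count, f"{count}-")
--         substituentStrings.append(f"{positionsStr}-{multiplicativePrefix}{prefix}")
--
--     return "-".join(substituentStrings)
-- ===== SOURCE B (Python) =====
-- ORDER = [
--     ("CH3", "metylo"),
--     ("C2H5", "etylo"),
--     ("Cl", "chloro"),
--     ("Br", "bromo"),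
--     ("F", "fluoro"),
--     ("NO2", "nitro"),
-- ]
--
-- MULT = ["", "di", "tri", "tetra", "penta", "heksa", "hepta", "okta", "nona", "deka"]
--
--
-- def _prefix(t):
--     for k, v in ORDER:
--         if k == t:
--             return v
--     return t
--
--
-- def generateSubstituentString(substituents):
--     seen = []
--     for _, t in substituents:
--         if t not in seen:
--             seen.append(t)
--     pieces = []
--     for t in sorted(seen, key=_prefix):
--         positions = sorted(p for p, u in substituents if u == t)
--         posStr = ",".join(map(str, positions))
--         n = len(positions)
--         mp = MULT[n - 1] if 1 <= n <= 10 else f"{n}-"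
--         pieces.append(f"{posStr}-{mp}{_prefix(t)}")
--     return "-".join(pieces)
-- ===== Notes on version B (the rewrite author's own statement) =====
-- stated objective: alternative
-- what changed: Replaces the dict-of-lists bucketing with an ordered dedup of the type names followed by a per-type filter scan over the input (no grouping dictionary is ever built), and replaces the multiplicative-prefix dict with an indexed list.
import Mathlib
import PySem

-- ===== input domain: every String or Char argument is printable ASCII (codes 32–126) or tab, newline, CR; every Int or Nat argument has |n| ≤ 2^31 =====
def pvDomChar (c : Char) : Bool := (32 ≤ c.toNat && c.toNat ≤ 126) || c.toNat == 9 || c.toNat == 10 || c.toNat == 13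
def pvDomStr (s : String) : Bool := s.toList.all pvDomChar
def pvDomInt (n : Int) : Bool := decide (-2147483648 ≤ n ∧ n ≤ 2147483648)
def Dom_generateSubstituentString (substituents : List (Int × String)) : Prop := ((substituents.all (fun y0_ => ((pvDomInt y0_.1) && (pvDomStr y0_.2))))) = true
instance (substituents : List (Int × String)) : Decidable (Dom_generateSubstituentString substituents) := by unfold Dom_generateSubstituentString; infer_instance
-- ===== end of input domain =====

-- B replaces A's dict-of-lists bucketing by an ordered dedup of the types plus a
-- per-type filter scan, and the multiplicative-prefix dict by an indexed list
-- (alternative decomposition, similar cost).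

-- ===== PORT A =====
def pvOrderA : PySem.Dict String String := PySem.Dict.ofList
  [("CH3", "metylo"), ("C2H5", "etylo"), ("Cl", "chloro"),
   ("Br", "bromo"), ("F", "fluoro"), ("NO2", "nitro")]

def pvMultA : PySem.Dict Int String := PySem.Dict.ofList
  [(1, ""), (2, "di"), (3, "tri"), (4, "tetra"), (5, "penta"),
   (6, "heksa"), (7, "hepta"), (8, "okta"), (9, "nona"), (10, "deka")]

def generateSubstituentString (substituents : List (Int × String)) : String :=
  -- 'if type_ not in substituentCounts: …[type_] = []' then '…[type_].append(position)'
  let substituentCounts : PySem.Dict String (List Int) :=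
    substituents.foldl (fun d q =>
      let d1 := if d.contains q.2 then d else d.insert q.2 ([] : List Int)
      d1.insert q.2 (d1.getD q.2 [] ++ [q.1])) PySem.Dict.empty
  let substituentStrings :=
    (PySem.List.sorted substituentCounts.items (fun x => pvOrderA.getD x.1 x.1) false).map
      (fun x =>
        let count : Int := (x.2.length : Int)
        let positionsStr :=
          PySem.Str.join "," ((PySem.List.sorted x.2 (fun p => p) false).map PySem.Int.toStr)
        let pfix := pvOrderA.getD x.1 x.1
        let multiplicativePrefix := pvMultA.getD count (PySem.Int.toStr count ++ "-")
        positionsStr ++ "-" ++ multiplicativePrefix ++ pfix)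
  PySem.Str.join "-" substituentStrings

-- ===== PORT B =====
def pvOrderB : List (String × String) :=
  [("CH3", "metylo"), ("C2H5", "etylo"), ("Cl", "chloro"),
   ("Br", "bromo"), ("F", "fluoro"), ("NO2", "nitro")]

def pvMultB : List String :=
  ["", "di", "tri", "tetra", "penta", "heksa", "hepta", "okta", "nona", "deka"]

-- '_prefix': first-match scan over the ORDER association list
def pvPrefixB (t : String) : String :=
  pvOrderB.foldr (fun kv acc => if kv.1 == t then kv.2 else acc) t

def generateSubstituentString_alt (substituents : List (Int × String)) : String :=
  let seen : PySem.Set String :=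
    substituents.foldl (fun s q => PySem.Set.add s q.2) PySem.Set.empty
  let pieces :=
    (PySem.List.sorted seen (fun u => pvPrefixB u) false).map (fun t =>
      let positions :=
        PySem.List.sorted ((substituents.filter (fun q => q.2 == t)).map (·.1)) (fun p => p) false
      let posStr := PySem.Str.join "," (positions.map PySem.Int.toStr)
      let n : Int := (positions.length : Int)
      let mp := if 1 ≤ n ∧ n ≤ 10 then PySem.List.pyGetD pvMultB (n - 1) "" else PySem.Int.toStr n ++ "-"
      posStr ++ "-" ++ mp ++ pvPrefixB t)
  PySem.Str.join "-" pieces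

-- ===== PRECONDITION & SPEC =====
def Spec_generateSubstituentString (substituents : List (Int × String)) (out : String) : Prop := out = generateSubstituentString_alt substituents
instance (substituents : List (Int × String)) (out : String) : Decidable (Spec_generateSubstituentString substituents out) := by unfold Spec_generateSubstituentString; infer_instance

-- ===== CLAIM (what is proved, stated in full; the proofs are below) =====
def Claim_equal_generateSubstituentString : Prop := ∀ (substituents : List (Int × String)), Dom_generateSubstituentString substituents → Spec_generateSubstituentString substituents (generateSubstituentString substituents)

-- ===== LEMMAS AND PROOFS =====

-- Python's "d[k] = f(d.get(k, d0))" for lists: modify is insert of the extended value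
lemma modify_eq_insert (d : PySem.Dict String (List Int)) (k : String) (p : Int) :
    d.modify k [] (· ++ [p]) = d.insert k (d.getD k [] ++ [p]) := rfl

-- A's two statements (ensure key, then append) are exactly one 'modify … [] (· ++ [p])'
lemma stepA_eq_modify (d : PySem.Dict String (List Int)) (q : Int × String) :
    (let d1 := if d.contains q.2 then d else d.insert q.2 ([] : List Int)
     d1.insert q.2 (d1.getD q.2 [] ++ [q.1])) = d.modify q.2 [] (· ++ [q.1]) := by
  rw [modify_eq_insert]
  by_cases h : d.contains q.2 = true
  · simp only [h, if_pos]
  · have hf : d.contains q.2 = false := by simpa using h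
    simp only [hf, Bool.false_eq_true, if_false]
    rw [PySem.Dict.getD_insert_self, PySem.Dict.insert_insert_self,
        PySem.Dict.getD_of_not_contains d _ hf]

lemma foldA_eq_foldl_modify (substituents : List (Int × String)) :
    substituents.foldl (fun d q =>
      let d1 := if d.contains q.2 then d else d.insert q.2 ([] : List Int)
      d1.insert q.2 (d1.getD q.2 [] ++ [q.1])) PySem.Dict.empty
    = substituents.foldl (fun d q => d.modify q.2 [] (· ++ [q.1])) PySem.Dict.empty := by
  have : (fun (d : PySem.Dict String (List Int)) (q : Int × String) =>
      let d1 := if d.contains q.2 then d else d.insert q.2 ([] : List Int)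
      d1.insert q.2 (d1.getD q.2 [] ++ [q.1]))
      = fun d q => d.modify q.2 [] (· ++ [q.1]) :=
    funext fun d => funext fun q => stepA_eq_modify d q
  rw [this]

-- the prefix lookup: B's first-match scan equals A's dict getD
set_option maxHeartbeats 1000000 in
lemma prefix_eq (t : String) : pvPrefixB t = pvOrderA.getD t t := by
  by_cases h1 : t = "CH3"
  · subst h1; rfl
  by_cases h2 : t = "C2H5"
  · subst h2; rfl
  by_cases h3 : t = "Cl"
  · subst h3; rfl
  by_cases h4 : t = "Br"
  · subst h4; rfl
  by_cases h5 : t = "F"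
  · subst h5; rfl
  by_cases h6 : t = "NO2"
  · subst h6; rfl
  have g1 : ¬("CH3" : String) = t := fun h => h1 h.symm
  have g2 : ¬("C2H5" : String) = t := fun h => h2 h.symm
  have g3 : ¬("Cl" : String) = t := fun h => h3 h.symm
  have g4 : ¬("Br" : String) = t := fun h => h4 h.symm
  have g5 : ¬("F" : String) = t := fun h => h5 h.symm
  have g6 : ¬("NO2" : String) = t := fun h => h6 h.symm
  have b1 : (("CH3" : String) == t) = false := beq_eq_false_iff_ne.mpr g1
  have b2 : (("C2H5" : String) == t) = false := beq_eq_false_iff_ne.mpr g2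
  have b3 : (("Cl" : String) == t) = false := beq_eq_false_iff_ne.mpr g3
  have b4 : (("Br" : String) == t) = false := beq_eq_false_iff_ne.mpr g4
  have b5 : (("F" : String) == t) = false := beq_eq_false_iff_ne.mpr g5
  have b6 : (("NO2" : String) == t) = false := beq_eq_false_iff_ne.mpr g6
  simp [pvPrefixB, pvOrderB, pvOrderA, PySem.Dict.getD, PySem.Dict.ofList,
    PySem.Dict.update, PySem.Dict.insert, PySem.Dict.empty, PySem.Dict.get?,
    PySem.Dict.contains, List.find?, g1, g2, g3, g4, g5, g6, b1, b2, b3, b4, b5, b6]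

-- the multiplicative prefix: A's dict.get equals B's guarded list indexing, for counts ≥ 0
set_option maxHeartbeats 1000000 in
lemma mult_eq (n : Int) (h : 0 ≤ n) :
    pvMultA.getD n (PySem.Int.toStr n ++ "-")
      = if 1 ≤ n ∧ n ≤ 10 then PySem.List.pyGetD pvMultB (n - 1) "" else PySem.Int.toStr n ++ "-" := by
  by_cases hr : 1 ≤ n ∧ n ≤ 10
  · rw [if_pos hr]
    obtain ⟨ha, hb⟩ := hr
    interval_cases n <;> rfl
  · rw [if_neg hr]
    have g : ∀ m : Int, m ∈ ([1,2,3,4,5,6,7,8,9,10] : List Int) → ¬ m = n := by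
      intro m hm he; subst he; revert hr; simp at hm; omega
    simp [pvMultA, PySem.Dict.getD, PySem.Dict.ofList, PySem.Dict.update,
      PySem.Dict.insert, PySem.Dict.empty, PySem.Dict.get?, PySem.Dict.contains, List.find?,
      beq_eq_false_iff_ne.mpr (g 1 (by simp)), beq_eq_false_iff_ne.mpr (g 2 (by simp)),
      beq_eq_false_iff_ne.mpr (g 3 (by simp)), beq_eq_false_iff_ne.mpr (g 4 (by simp)),
      beq_eq_false_iff_ne.mpr (g 5 (by simp)), beq_eq_false_iff_ne.mpr (g 6 (by simp)),
      beq_eq_false_iff_ne.mpr (g 7 (by simp)), beq_eq_false_iff_ne.mpr (g 8 (by simp)),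
      beq_eq_false_iff_ne.mpr (g 9 (by simp)), beq_eq_false_iff_ne.mpr (g 10 (by simp))]

-- stable insertion commutes with mapping when the comparison factors through the map
lemma insertBy_map {α β : Type} (g : α → β) (p : β → β → Bool) (p' : α → α → Bool)
    (hp : ∀ a b, p (g a) (g b) = p' a b) (x : α) (l : List α) :
    PySem.List.insertBy p (g x) (l.map g) = (PySem.List.insertBy p' x l).map g := by
  induction l with
  | nil => simp [PySem.List.insertBy]
  | cons y ys ih => simp [PySem.List.insertBy, hp]; split <;> simp [ih]

-- stable sort commutes with mapping when the key factors through the map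
lemma sorted_map_factor {α β κ : Type} [LT κ] [DecidableLT κ] (g : α → β) (key : β → κ) (l : List α) :
    PySem.List.sorted (l.map g) key false = (PySem.List.sorted l (fun a => key (g a)) false).map g := by
  rw [PySem.List.sorted_eq_foldl_insertBy, PySem.List.sorted_eq_foldl_insertBy, List.foldl_map]
  have main : ∀ (acc : List α),
      (l.foldl (fun acc x => PySem.List.insertBy (fun a b => decide (key a < key b)) (g x) acc) (acc.map g))
      = (l.foldl (fun acc x => PySem.List.insertBy (fun a b => decide (key (g a) < key (g b))) x acc) acc).map g := by
    induction l with
    | nil => intro acc; rfl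
    | cons y ys ih =>
      intro acc
      simp only [List.foldl_cons]
      rw [insertBy_map g _ _ (fun a b => rfl), ih]
  simpa using main []

lemma main_eq (subs : List (Int × String)) :
    generateSubstituentString subs = generateSubstituentString_alt subs := by
  have foldA_eq := foldA_eq_foldl_modify subs
  set dm := subs.foldl (fun d q => d.modify q.2 [] (· ++ [q.1])) PySem.Dict.empty with hdm
  set S := PySem.Set.ofList (subs.map (·.2)) with hS
  have hkeys : dm.keys = S := by
    rw [hdm, PySem.Dict.keys_foldl_modify_key]
    simp [PySem.Set.update_nil_left]
    rfl
  have hnodup : dm.keys.Nodup := by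
    rw [hdm]
    exact PySem.Dict.nodup_keys_foldl_modify_key _ _ _ _ _ PySem.Dict.nodup_keys_empty
  have hgetD : ∀ t, dm.getD t [] = (subs.filter (fun q => q.2 == t)).map (·.1) := by
    intro t
    have hsw : dm = (subs.map (fun q => (q.2, q.1))).foldl
        (fun d p => d.modify p.1 [] (· ++ [p.2])) PySem.Dict.empty := by
      rw [hdm, List.foldl_map]
    rw [hsw, PySem.Dict.getD_foldl_modify_append]
    simp [List.filter_map, List.map_map, Function.comp_def]
  have hitems : dm.items = S.map (fun t => (t, (subs.filter (fun q => q.2 == t)).map (·.1))) := by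
    rw [PySem.Dict.items_eq_map_keys dm hnodup [], hkeys]
    exact List.map_congr_left fun t _ => by rw [hgetD]
  have hseen : subs.foldl (fun s q => PySem.Set.add s q.2) PySem.Set.empty = S := by
    rw [hS, PySem.Set.ofList_eq_foldl, List.foldl_map]
    rfl
  simp only [generateSubstituentString, generateSubstituentString_alt, foldA_eq, hitems, hseen]
  rw [sorted_map_factor]
  rw [List.map_map]
  have hkey : (fun a : String => pvOrderA.getD a a) = fun u : String => pvPrefixB u :=
    funext fun t => (prefix_eq t).symm
  rw [hkey]
  apply congrArg (PySem.Str.join "-")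
  apply List.map_congr_left
  intro t ht
  simp only [Function.comp_apply, PySem.List.length_sorted]
  rw [mult_eq _ (Int.natCast_nonneg _), prefix_eq]

-- ===== VERDICT (by name: the statement is the Claim_ definition above) =====
theorem generateSubstituentString_spec : Claim_equal_generateSubstituentString := by
  intro subs _
  exact main_eq subs
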